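-- pv_equiv track=rewrite | github.com/hbeyer1/cdtm-paths | app_plotly.py | categorize_field
-- ===== SOURCE A (Python) =====
-- def categorize_field(field: str, degree: str) -> str:
--     if not field:
--         if degree and 'mba' in degree.lower():
--             return "Business"
--         return "Other"
--     field_lower = field.lower()
--     if any(term in field_lower for term in ['engineering', 'computer', 'informatics', 'software', 'electrical', 'mechanical', 'technology']):
--         return "Engineering/Tech"
--     if any(term in field_lower for term in ['business', 'management', 'mba', 'economics', 'finance', 'bwl']):
--         return "Business"
--     if any(term in field_lower for term in ['physics', 'chemistry', 'biology', 'mathematics', 'science', 'biotech']):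
--         return "Sciences"
--     return "Other"
-- ===== SOURCE B (Python) =====
-- _KEYWORD_PRIORITY = {
--     'engineering': 0, 'computer': 0, 'informatics': 0, 'software': 0,
--     'electrical': 0, 'mechanical': 0, 'technology': 0,
--     'business': 1, 'management': 1, 'mba': 1, 'economics': 1, 'finance': 1, 'bwl': 1,
--     'physics': 2, 'chemistry': 2, 'biology': 2, 'mathematics': 2, 'science': 2, 'biotech': 2,
-- }
-- _NAMES = ["Engineering/Tech", "Business", "Sciences", "Other"]
--
-- def categorize_field(field: str, degree: str) -> str:
--     if not field:
--         return "Business" if degree and 'mba' in degree.lower() else "Other"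
--     field_lower = field.lower()
--     best = 3
--     for kw, pri in _KEYWORD_PRIORITY.items():
--         if pri < best and kw in field_lower:
--             best = pri
--     return _NAMES[best]
-- ===== Notes on version B (the rewrite author's own statement) =====
-- stated objective: alternative
-- what changed: Replaces the three ordered any()-branches with early returns by a single arg-min pass over a flat keyword->priority map, accumulating the lowest matching priority and indexing the category name by it.
import Mathlib
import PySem

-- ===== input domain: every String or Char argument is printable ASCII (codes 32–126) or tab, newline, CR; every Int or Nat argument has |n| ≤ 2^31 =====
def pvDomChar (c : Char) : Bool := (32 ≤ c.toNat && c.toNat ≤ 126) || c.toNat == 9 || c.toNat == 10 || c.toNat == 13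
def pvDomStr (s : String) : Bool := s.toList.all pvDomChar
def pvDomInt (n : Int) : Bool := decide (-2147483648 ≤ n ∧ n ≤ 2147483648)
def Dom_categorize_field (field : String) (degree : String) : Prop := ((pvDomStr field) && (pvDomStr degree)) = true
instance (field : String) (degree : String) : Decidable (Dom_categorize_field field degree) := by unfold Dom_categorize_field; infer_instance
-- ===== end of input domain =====

-- B replaces A's three ordered any()-branches by one arg-min pass over a flat keyword->priority map (alternative decomposition, same cost).

-- ===== PORT A =====
def categorize_field (field : String) (degree : String) : String :=
  if field = "" then
    (if degree ≠ "" ∧ PySem.Str.isIn "mba" (PySem.Str.lower degree) = true then "Business" else "Other")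
  else
    let field_lower := PySem.Str.lower field
    if (["engineering", "computer", "informatics", "software", "electrical", "mechanical", "technology"].any
        (fun term => PySem.Str.isIn term field_lower)) then "Engineering/Tech"
    else if (["business", "management", "mba", "economics", "finance", "bwl"].any
        (fun term => PySem.Str.isIn term field_lower)) then "Business"
    else if (["physics", "chemistry", "biology", "mathematics", "science", "biotech"].any
        (fun term => PySem.Str.isIn term field_lower)) then "Sciences"
    else "Other"

-- ===== PORT B =====
-- the _KEYWORD_PRIORITY dict as an association list in insertion order
def pvKeywordPriority : List (String × Nat) :=
  [("engineering", 0), ("computer", 0), ("informatics", 0), ("software", 0),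
   ("electrical", 0), ("mechanical", 0), ("technology", 0),
   ("business", 1), ("management", 1), ("mba", 1), ("economics", 1), ("finance", 1), ("bwl", 1),
   ("physics", 2), ("chemistry", 2), ("biology", 2), ("mathematics", 2), ("science", 2), ("biotech", 2)]

def pvNames : List String := ["Engineering/Tech", "Business", "Sciences", "Other"]

def categorize_field_alt (field : String) (degree : String) : String :=
  if field = "" then
    (if degree ≠ "" ∧ PySem.Str.isIn "mba" (PySem.Str.lower degree) = true then "Business" else "Other")
  else
    let field_lower := PySem.Str.lower field
    let best := pvKeywordPriority.foldl
      (fun b kp => if kp.2 < b ∧ PySem.Str.isIn kp.1 field_lower = true then kp.2 else b) 3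
    -- _NAMES[best]: best is always in range 0..3, so plain indexing never fails
    pvNames.getD best "Other"

-- ===== PRECONDITION & SPEC =====
def Spec_categorize_field (field : String) (degree : String) (out : String) : Prop := out = categorize_field_alt field degree
instance (field : String) (degree : String) (out : String) : Decidable (Spec_categorize_field field degree out) := by unfold Spec_categorize_field; infer_instance

-- ===== CLAIM (what is proved, stated in full; the proofs are below) =====
def Claim_equal_categorize_field : Prop := ∀ (field : String) (degree : String), Dom_categorize_field field degree → Spec_categorize_field field degree (categorize_field field degree)

-- ===== LEMMAS AND PROOFS =====

-- B's guarded update is the same as a min-update (c abstracts the keyword-match test)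
theorem pv_fold_guard_eq_min (c : String × Nat → Bool) (K : List (String × Nat)) : ∀ b : Nat,
    K.foldl (fun b kp => if kp.2 < b ∧ c kp = true then kp.2 else b) b
      = K.foldl (fun b kp => if c kp = true then min b kp.2 else b) b := by
  induction K with
  | nil => intro b; rfl
  | cons k K ih =>
    intro b
    rw [List.foldl_cons, List.foldl_cons, ih]
    congr 1
    by_cases hc : c k = true
    · simp only [hc, and_true, if_true]
      split_ifs <;> omega
    · simp [hc]

-- the min-fold is the min-fold over the priorities of the matching keywords
theorem pv_fold_min_eq_filter (c : String × Nat → Bool) (K : List (String × Nat)) : ∀ b : Nat,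
    K.foldl (fun b kp => if c kp = true then min b kp.2 else b) b
      = ((K.filter c).map Prod.snd).foldl min b := by
  induction K with
  | nil => intro b; rfl
  | cons k K ih =>
    intro b
    by_cases hc : c k = true
    · simp [List.foldl_cons, hc, ih]
    · simp [List.foldl_cons, hc, ih]

-- closed form of a min-fold over a list of values in {0,1,2}
theorem pv_fold_min_closed : ∀ (l : List Nat), (∀ x ∈ l, x ≤ 2) → ∀ b : Nat,
    l.foldl min b
      = if 0 ∈ l ∨ b = 0 then 0 else if 1 ∈ l ∨ b = 1 then 1 else if 2 ∈ l ∨ b = 2 then 2 else b := by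
  intro l
  induction l with
  | nil => intro _ b; simp; split_ifs <;> omega
  | cons a l ih =>
    intro h b
    have ha : a ≤ 2 := h a List.mem_cons_self
    rw [List.foldl_cons, ih (fun x hx => h x (List.mem_cons_of_mem _ hx)) (min b a)]
    by_cases h0 : (0 : Nat) ∈ l <;> by_cases h1 : (1 : Nat) ∈ l <;> by_cases h2 : (2 : Nat) ∈ l <;>
      simp only [List.mem_cons, h0, h1, h2, or_true, or_false, true_or, false_or] <;>
      split_ifs <;> omega

-- every stored priority is at most 2
theorem pv_all_le2 (p : String × Nat → Bool) :
    ∀ x ∈ ((pvKeywordPriority.filter p).map Prod.snd), x ≤ 2 := by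
  intro x hx
  simp only [List.mem_map, List.mem_filter] at hx
  obtain ⟨kp, ⟨hk, _⟩, rfl⟩ := hx
  fin_cases hk <;> omega

-- membership of each priority among the matched keywords, phrased as A's any-conditions
theorem pv_mem0 (fl : String) :
    (0 ∈ ((pvKeywordPriority.filter (fun kp => PySem.Str.isIn kp.1 fl)).map Prod.snd))
      ↔ (["engineering", "computer", "informatics", "software", "electrical", "mechanical", "technology"].any
          (fun term => PySem.Str.isIn term fl)) = true := by
  simp [pvKeywordPriority, List.mem_filter]

theorem pv_mem1 (fl : String) :
    (1 ∈ ((pvKeywordPriority.filter (fun kp => PySem.Str.isIn kp.1 fl)).map Prod.snd))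
      ↔ (["business", "management", "mba", "economics", "finance", "bwl"].any
          (fun term => PySem.Str.isIn term fl)) = true := by
  simp [pvKeywordPriority, List.mem_filter]

theorem pv_mem2 (fl : String) :
    (2 ∈ ((pvKeywordPriority.filter (fun kp => PySem.Str.isIn kp.1 fl)).map Prod.snd))
      ↔ (["physics", "chemistry", "biology", "mathematics", "science", "biotech"].any
          (fun term => PySem.Str.isIn term fl)) = true := by
  simp [pvKeywordPriority, List.mem_filter]

-- ===== VERDICT (by name: the statement is the Claim_ definition above) =====
theorem categorize_field_spec : Claim_equal_categorize_field := by
  intro field degree _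
  unfold Spec_categorize_field
  simp only [categorize_field, categorize_field_alt]
  by_cases hf : field = ""
  · rw [if_pos hf, if_pos hf]
  · rw [if_neg hf, if_neg hf,
      pv_fold_guard_eq_min (fun kp => PySem.Str.isIn kp.1 (PySem.Str.lower field)),
      pv_fold_min_eq_filter,
      pv_fold_min_closed _ (pv_all_le2 _) 3]
    simp only [pv_mem0, pv_mem1, pv_mem2]
    cases hE : (["engineering", "computer", "informatics", "software", "electrical", "mechanical", "technology"].any
          (fun term => PySem.Str.isIn term (PySem.Str.lower field))) <;>
    cases hB : (["business", "management", "mba", "economics", "finance", "bwl"].any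
          (fun term => PySem.Str.isIn term (PySem.Str.lower field))) <;>
    cases hS : (["physics", "chemistry", "biology", "mathematics", "science", "biotech"].any
          (fun term => PySem.Str.isIn term (PySem.Str.lower field))) <;>
    norm_num [pvNames]
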